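-- pv_equiv track=rewrite | github.com/blazerzar/advent-of-code | 2020/day_21.py | num_without_allergens
-- ===== SOURCE A (Python) =====
-- from typing import List, Tuple, Set, Dict
-- from collections import defaultdict
--
-- def num_without_allergens(food_list: List[Tuple[Set[str], Set[str]]]) \
--         -> Tuple[int, Dict[str, Set[str]]]:
--     """Return how many food from the list cannot contain any allergen"""
--     allergens_possible = dict()
--     num_of_appearances = defaultdict(int)
--
--     for foods, allergens in food_list:
--         # Increase appearances for each food
--         for food in foods:
--             num_of_appearances[food] += 1
--
--         # Add foods to allergens set
--         for allergen in allergens: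
--             if allergen not in allergens_possible.keys():
--                 allergens_possible[allergen] = set(foods)
--             else:
--                 allergens_possible[allergen] &= foods
--
--     food_with_allergens = set.union(*(set(x)
--                                       for x in allergens_possible.values()))
--
--     count = 0
--     for food, appearances in num_of_appearances.items():
--         count += appearances if food not in food_with_allergens else 0
--     return count, allergens_possible
-- ===== SOURCE B (Python) =====
-- def num_without_allergens(food_list):
--     """Return how many food from the list cannot contain any allergen"""
--     # Counting instead of set intersection: a food can carry an allergen iff
--     # it appears in EVERY entry listing that allergen, i.e. its
--     # (allergen, food) pair count reaches the allergen's entry count.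
--     n = {}      # allergen -> how many entries list it
--     first = {}  # allergen -> the foods of the first entry listing it
--     pair = {}   # (allergen, food) -> in how many of those entries the food appears
--     for foods, allergens in food_list:
--         for a in allergens:
--             n[a] = n.get(a, 0) + 1
--             if a not in first:
--                 first[a] = foods
--             for f in foods:
--                 pair[(a, f)] = pair.get((a, f), 0) + 1
--     allergens_possible = {a: {f for f in first[a] if pair[(a, f)] == n[a]}
--                           for a in n}
--     food_with_allergens = set.union(*allergens_possible.values())
--     count = sum(1 for foods, _ in food_list
--                 for f in foods if f not in food_with_allergens)
--     return count, allergens_possible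
-- ===== Notes on version B (the rewrite author's own statement) =====
-- stated objective: alternative
-- what changed: B computes the possible-foods sets without any set intersection: one pass records, per allergen, how many entries list it, the foods of the first such entry, and per (allergen, food) pair in how many of those entries the food appears; each allergen's set is then the threshold filter 'pair count == entry count' over that first entry's foods, and A's appearance-counter dict is replaced by a final direct counting pass over the input.
-- outside the precondition, e.g. on num_without_allergens([({'a', 'b'}, set())]): A raises TypeError, B raises TypeError
import Mathlib
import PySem

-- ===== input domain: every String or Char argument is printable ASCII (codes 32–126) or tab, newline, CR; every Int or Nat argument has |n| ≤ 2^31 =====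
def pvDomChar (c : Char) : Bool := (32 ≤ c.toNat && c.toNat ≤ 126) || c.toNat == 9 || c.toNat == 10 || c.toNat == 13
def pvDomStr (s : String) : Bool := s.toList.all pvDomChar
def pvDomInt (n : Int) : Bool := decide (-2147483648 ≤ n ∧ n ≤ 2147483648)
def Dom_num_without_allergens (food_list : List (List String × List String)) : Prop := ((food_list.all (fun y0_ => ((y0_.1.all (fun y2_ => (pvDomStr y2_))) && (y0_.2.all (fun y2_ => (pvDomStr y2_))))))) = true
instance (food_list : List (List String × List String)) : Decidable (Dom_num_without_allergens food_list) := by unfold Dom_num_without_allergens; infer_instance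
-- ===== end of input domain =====

-- B replaces A's incremental set-intersection dict (and its appearance counter) by pure counting:
-- per allergen the number of entries listing it, per (allergen, food) pair the number of those
-- entries containing the food; each possible-set is a threshold filter (pair count == entry count)
-- over the first entry's foods, and the count is a final direct pass (objective: alternative, same cost).
-- Both Pythons' foods/allergens parameters are sets; every 'for x in <set>' is ported by iterating
-- the distinct elements (PySem.Set.ofList) of the encoding list.

-- ===== PORT A =====
def num_without_allergens (food_list : List (List String × List String)) : Int × (List (String × List String)) :=
  let st := food_list.foldl
    (fun (st : PySem.Dict String (List String) × PySem.Dict String Int) p =>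
      -- allergens_possible: insert set(foods) for a new allergen, else &= foods
      ((PySem.Set.ofList p.2).foldl (fun d al =>
          if d.contains al = false then d.insert al (PySem.Set.ofList p.1)
          else d.modify al [] (fun s => PySem.Set.inter s (PySem.Set.ofList p.1))) st.1,
       -- num_of_appearances[food] += 1   (defaultdict(int))
       (PySem.Set.ofList p.1).foldl (fun d food => d.modify food 0 (· + 1)) st.2))
    (PySem.Dict.empty, PySem.Dict.empty)
  -- set.union(*(set(x) for x in values)); Python raises TypeError when the dict is empty — excluded by Pre_
  let fwa : PySem.Set String :=
    st.1.values.foldl (fun acc x => PySem.Set.union acc (PySem.Set.ofList x)) PySem.Set.empty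
  let count : Int := st.2.items.foldl
    (fun c q => c + (if PySem.Set.contains fwa q.1 then 0 else q.2)) 0
  (count, st.1.items)

-- ===== PORT B =====
def num_without_allergens_alt (food_list : List (List String × List String)) : Int × (List (String × List String)) :=
  -- one pass filling n (entries per allergen), first (foods of its first entry), pair (pair counts)
  let st := food_list.foldl
    (fun (st : PySem.Dict String Int × PySem.Dict String (List String) × PySem.Dict (String × String) Int) p =>
      (PySem.Set.ofList p.2).foldl (fun st a =>
        (st.1.modify a 0 (· + 1),
         (if st.2.1.contains a then st.2.1 else st.2.1.insert a (PySem.Set.ofList p.1)),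
         (PySem.Set.ofList p.1).foldl (fun d f => d.modify (a, f) 0 (· + 1)) st.2.2)) st)
    (PySem.Dict.empty, PySem.Dict.empty, PySem.Dict.empty)
  -- {a: {f for f in first[a] if pair[(a, f)] == n[a]} for a in n}
  let ap : List (String × List String) :=
    st.1.items.map (fun q =>
      (q.1, (st.2.1.getD q.1 []).filter (fun f => st.2.2.getD (q.1, f) 0 == st.1.getD q.1 0)))
  -- set.union(*allergens_possible.values()); TypeError when empty — excluded by Pre_
  let fwa : PySem.Set String :=
    (ap.map (fun q => q.2)).foldl (fun acc s => PySem.Set.union acc s) PySem.Set.empty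
  -- sum(1 for foods, _ in food_list for f in foods if f not in food_with_allergens)
  let count : Int := food_list.foldl
    (fun c p => c + (((PySem.Set.ofList p.1).filter (fun f => !PySem.Set.contains fwa f)).length : Int)) 0
  (count, ap)

-- ===== PRECONDITION & SPEC =====
-- Pre_ excludes inputs whose entries all have empty allergen sets: there both Pythons raise
-- TypeError on set.union() with no arguments.
def Pre_num_without_allergens (food_list : List (List String × List String)) : Prop :=
  ∃ p ∈ food_list, p.2 ≠ []
instance (food_list : List (List String × List String)) : Decidable (Pre_num_without_allergens food_list) := by unfold Pre_num_without_allergens; infer_instance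

def pvWitness_num_without_allergens : (List (List String × List String)) :=
  [(["mxmxvkd", "kfcds"], ["dairy"]), (["sqjhc"], [])]

def Spec_num_without_allergens (food_list : List (List String × List String)) (out : Int × (List (String × List String))) : Prop := out = num_without_allergens_alt food_list
instance (food_list : List (List String × List String)) (out : Int × (List (String × List String))) : Decidable (Spec_num_without_allergens food_list out) := by unfold Spec_num_without_allergens; infer_instance

-- ===== CLAIM (what is proved, stated in full; the proofs are below) =====
def Claim_equal_num_without_allergens : Prop := ∀ (food_list : List (List String × List String)), Dom_num_without_allergens food_list → Pre_num_without_allergens food_list → Spec_num_without_allergens food_list (num_without_allergens food_list)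

-- ===== LEMMAS AND PROOFS =====

-- the value B's threshold filter assigns to allergen a
def pvVal (n : PySem.Dict String Int) (first : PySem.Dict String (List String))
    (pair : PySem.Dict (String × String) Int) (a : String) : List String :=
  (first.getD a []).filter (fun f => pair.getD (a, f) 0 == n.getD a 0)

-- simulation invariant between A's dict and B's three dicts
def pvInv (ap : PySem.Dict String (List String)) (n : PySem.Dict String Int)
    (first : PySem.Dict String (List String)) (pair : PySem.Dict (String × String) Int) : Prop :=
  ap.keys = n.keys ∧ ap.keys.Nodup ∧
  (∀ a, ap.contains a = first.contains a) ∧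
  (∀ a f, pair.contains (a, f) = true → ap.contains a = true) ∧
  (∀ a f, pair.getD (a, f) 0 ≤ n.getD a 0) ∧
  (∀ a, ap.contains a = true → ap.getD a [] = pvVal n first pair a)

theorem pv_pair_getD (l : List String) (a : String)
    (pair : PySem.Dict (String × String) Int) (b g : String) :
    (l.foldl (fun d f => d.modify (a, f) 0 (· + 1)) pair).getD (b, g) 0
      = pair.getD (b, g) 0 + (if b = a then (l.count g : Int) else 0) := by
  induction l generalizing pair with
  | nil => simp
  | cons f t ih =>
    rw [List.foldl_cons, ih, PySem.Dict.getD_modify]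
    by_cases hb : b = a
    · subst hb
      by_cases hg : g = f
      · subst hg; simp; ring
      · have hne : ((b, g) : String × String) ≠ (b, f) := by simp [hg]
        have hgf : ¬ f = g := fun hh => hg hh.symm
        simp [hne, hgf]
    · have : ((b, g) : String × String) ≠ (a, f) := by simp [hb]
      simp [this, hb]

theorem pv_pair_contains (l : List String) (a : String)
    (pair : PySem.Dict (String × String) Int) (b g : String) :
    (l.foldl (fun d f => d.modify (a, f) 0 (· + 1)) pair).contains (b, g) = true
      ↔ (pair.contains (b, g) = true ∨ (b = a ∧ g ∈ l)) := by
  rw [PySem.Dict.contains_iff_mem_keys,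
      PySem.Dict.keys_foldl_modify_key l (fun f => ((a, f) : String × String)) 0
        (fun _ _ => (· + 1)) pair,
      PySem.Set.mem_update, PySem.Dict.contains_iff_mem_keys]
  constructor
  · rintro (h | h)
    · exact Or.inl h
    · obtain ⟨f, hf, he⟩ := List.mem_map.1 h
      injection he with h1 h2
      subst h1; subst h2
      exact Or.inr ⟨rfl, hf⟩
  · rintro (h | ⟨rfl, hg⟩)
    · exact Or.inl h
    · exact Or.inr (List.mem_map.2 ⟨g, hg, rfl⟩)

theorem pv_step (fs : List String) (a : String)
    (ap : PySem.Dict String (List String)) (n : PySem.Dict String Int)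
    (first : PySem.Dict String (List String)) (pair : PySem.Dict (String × String) Int)
    (h : pvInv ap n first pair) :
    pvInv (if ap.contains a = false then ap.insert a (PySem.Set.ofList fs)
           else ap.modify a [] (fun s => PySem.Set.inter s (PySem.Set.ofList fs)))
          (n.modify a 0 (· + 1))
          (if first.contains a then first else first.insert a (PySem.Set.ofList fs))
          ((PySem.Set.ofList fs).foldl (fun d f => d.modify (a, f) 0 (· + 1)) pair) := by
  obtain ⟨hk, hnd, hf, hp, hle, hv⟩ := h
  have hca : ap.contains a = n.contains a := by
    rw [Bool.eq_iff_iff, PySem.Dict.contains_iff_mem_keys, PySem.Dict.contains_iff_mem_keys, hk]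
  have hapc : ∀ x, (if ap.contains a = false then ap.insert a (PySem.Set.ofList fs)
      else ap.modify a [] (fun s => PySem.Set.inter s (PySem.Set.ofList fs))).contains x
        = (x == a || ap.contains x) := by
    intro x
    by_cases hb : ap.contains a = false
    · rw [if_pos hb, PySem.Dict.contains_insert]
    · rw [if_neg hb, PySem.Dict.contains_modify]
  have hapg : ∀ x, x ≠ a → (if ap.contains a = false then ap.insert a (PySem.Set.ofList fs)
      else ap.modify a [] (fun s => PySem.Set.inter s (PySem.Set.ofList fs))).getD x []
        = ap.getD x [] := by
    intro x hx
    by_cases hb : ap.contains a = false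
    · rw [if_pos hb, PySem.Dict.getD_insert, if_neg hx]
    · rw [if_neg hb, PySem.Dict.getD_modify, if_neg hx]
  have hnk : (n.modify a 0 (· + 1)).keys
      = (if n.contains a then n.keys else n.keys ++ [a]) := by
    rw [PySem.Dict.keys_modify]
    by_cases hc : n.contains a = true
    · rw [PySem.Dict.keys_insert_of_contains _ _ hc, if_pos hc]
    · have hc' : n.contains a = false := by simpa using hc
      rw [PySem.Dict.keys_insert_of_not_contains _ _ hc', if_neg (by simp [hc'])]
  have hng : ∀ x, (n.modify a 0 (· + 1)).getD x 0
      = if x = a then n.getD a 0 + 1 else n.getD x 0 := by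
    intro x; rw [PySem.Dict.getD_modify]
  refine ⟨?_, ?_, ?_, ?_, ?_, ?_⟩
  · -- keys equal
    rw [hnk]
    by_cases hc : ap.contains a = true
    · have hcn : n.contains a = true := by rw [← hca]; exact hc
      rw [if_pos hcn, if_neg (by simp [hc]), PySem.Dict.keys_modify]
      rw [PySem.Dict.keys_insert_of_contains _ _ hc]; exact hk
    · have hc' : ap.contains a = false := by simpa using hc
      have hcn : n.contains a = false := by rw [← hca]; exact hc'
      rw [if_pos hc', if_neg (by simp [hcn]),
          PySem.Dict.keys_insert_of_not_contains _ _ hc', hk]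
  · -- keys nodup
    by_cases hc : ap.contains a = true
    · rw [if_neg (by simp [hc]), PySem.Dict.keys_modify,
          PySem.Dict.keys_insert_of_contains _ _ hc]; exact hnd
    · have hc' : ap.contains a = false := by simpa using hc
      rw [if_pos hc', PySem.Dict.keys_insert_of_not_contains _ _ hc']
      have hna : a ∉ ap.keys := fun hm =>
        by simp [(PySem.Dict.contains_iff_mem_keys ap a).2 hm] at hc'
      simp [List.nodup_append, hnd]
      intro x hx he
      exact hna (he ▸ hx)
  · -- contains agrees with first'
    intro x
    rw [hapc x]
    by_cases hc : first.contains a = true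
    · rw [if_pos hc]
      by_cases hx : x = a
      · subst hx; simp [hf x, hc]
      · simp [hx, hf x]
    · have hc' : first.contains a = false := by simpa using hc
      rw [if_neg (by simp [hc']), PySem.Dict.contains_insert, hf x]
  · -- pair contains → ap' contains
    intro b g hbg
    rw [hapc b]
    rcases (pv_pair_contains _ _ _ _ _).1 hbg with hold | ⟨rfl, _⟩
    · rw [hp b g hold]; simp
    · simp
  · -- pair ≤ n
    intro b g
    rw [pv_pair_getD, hng b]
    by_cases hb : b = a
    · subst hb
      have hcnt : (PySem.Set.ofList fs).count g ≤ 1 :=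
        List.nodup_iff_count_le_one.1 (PySem.Set.nodup_ofList fs) g
      have := hle b g
      rw [if_pos rfl, if_pos rfl]
      omega
    · simp only [if_neg hb]
      simpa using hle b g
  · -- value characterization
    intro b hb
    by_cases hba : b = a
    · subst hba
      by_cases hc : ap.contains b = false
      · -- new allergen
        rw [if_pos hc, PySem.Dict.getD_insert, if_pos rfl]
        unfold pvVal
        have hfc : first.contains b = false := by rw [← hf b]; exact hc
        rw [if_neg (by simp [hfc]), PySem.Dict.getD_insert, if_pos rfl]
        have hn0 : n.getD b 0 = 0 :=
          PySem.Dict.getD_of_not_contains n 0 (by rw [← hca]; exact hc)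
        have hpair0 : ∀ f, pair.getD (b, f) 0 = 0 := by
          intro f
          refine PySem.Dict.getD_of_not_contains pair 0 ?_
          cases hpc : pair.contains (b, f) with
          | false => rfl
          | true => exact absurd (hp b f hpc) (by simp [hc])
        symm
        rw [List.filter_eq_self]
        intro f hfm
        rw [pv_pair_getD, hng b, if_pos rfl, hpair0 f, hn0,
            List.count_eq_one_of_mem (PySem.Set.nodup_ofList fs) hfm]
        simp
      · -- existing allergen
        have hc' : ap.contains b = true := by simpa using hc
        rw [if_neg hc, PySem.Dict.getD_modify, if_pos rfl, hv b hc']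
        unfold pvVal
        rw [if_pos (by rw [← hf b]; exact hc')]
        show PySem.Set.inter _ _ = _
        unfold PySem.Set.inter
        rw [List.filter_filter]
        apply List.filter_congr
        intro f _
        rw [pv_pair_getD, hng b, if_pos rfl, if_pos rfl]
        by_cases hmem : f ∈ PySem.Set.ofList fs
        · rw [List.count_eq_one_of_mem (PySem.Set.nodup_ofList fs) hmem]
          have hco : PySem.Set.contains (PySem.Set.ofList fs) f = true := by
            simpa using hmem
          rw [Bool.eq_iff_iff]
          simp only [Bool.and_eq_true, beq_iff_eq, hco, true_and]
          push_cast
          omega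
        · have hco : PySem.Set.contains (PySem.Set.ofList fs) f = false := by
            simpa using hmem
          rw [List.count_eq_zero.2 hmem, hco, Bool.false_and]
          have := hle b f
          symm
          rw [beq_eq_false_iff_ne]
          push_cast
          omega
    · -- untouched allergen
      have hb' : ap.contains b = true := by
        rw [hapc b] at hb
        simpa [hba] using hb
      rw [hapg b hba, hv b hb']
      unfold pvVal
      have hfg : (if first.contains a then first else first.insert a (PySem.Set.ofList fs)).getD b []
          = first.getD b [] := by
        by_cases hc : first.contains a = true
        · rw [if_pos hc]
        · rw [if_neg (by simpa using hc), PySem.Dict.getD_insert, if_neg hba]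
      rw [hfg]
      apply List.filter_congr
      intro f _
      rw [pv_pair_getD, hng b, if_neg hba, if_neg hba, add_zero]

theorem pv_inner (fs : List String) (as : List String)
    (ap : PySem.Dict String (List String))
    (st : PySem.Dict String Int × PySem.Dict String (List String) × PySem.Dict (String × String) Int)
    (h : pvInv ap st.1 st.2.1 st.2.2) :
    pvInv (as.foldl (fun d al =>
            if d.contains al = false then d.insert al (PySem.Set.ofList fs)
            else d.modify al [] (fun s => PySem.Set.inter s (PySem.Set.ofList fs))) ap)
          (as.foldl (fun st a =>
            (st.1.modify a 0 (· + 1),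
             (if st.2.1.contains a then st.2.1 else st.2.1.insert a (PySem.Set.ofList fs)),
             (PySem.Set.ofList fs).foldl (fun d f => d.modify (a, f) 0 (· + 1)) st.2.2)) st).1
          (as.foldl (fun st a =>
            (st.1.modify a 0 (· + 1),
             (if st.2.1.contains a then st.2.1 else st.2.1.insert a (PySem.Set.ofList fs)),
             (PySem.Set.ofList fs).foldl (fun d f => d.modify (a, f) 0 (· + 1)) st.2.2)) st).2.1
          (as.foldl (fun st a =>
            (st.1.modify a 0 (· + 1),
             (if st.2.1.contains a then st.2.1 else st.2.1.insert a (PySem.Set.ofList fs)),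
             (PySem.Set.ofList fs).foldl (fun d f => d.modify (a, f) 0 (· + 1)) st.2.2)) st).2.2 := by
  induction as generalizing ap st with
  | nil => exact h
  | cons a t ih =>
    simp only [List.foldl_cons]
    exact ih _ _ (pv_step fs a ap st.1 st.2.1 st.2.2 h)

theorem pv_outer (fl : List (List String × List String))
    (ap : PySem.Dict String (List String))
    (st : PySem.Dict String Int × PySem.Dict String (List String) × PySem.Dict (String × String) Int)
    (h : pvInv ap st.1 st.2.1 st.2.2) :
    pvInv (fl.foldl (fun d p => (PySem.Set.ofList p.2).foldl (fun d al =>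
            if d.contains al = false then d.insert al (PySem.Set.ofList p.1)
            else d.modify al [] (fun s => PySem.Set.inter s (PySem.Set.ofList p.1))) d) ap)
          (fl.foldl (fun st p => (PySem.Set.ofList p.2).foldl (fun st a =>
            (st.1.modify a 0 (· + 1),
             (if st.2.1.contains a then st.2.1 else st.2.1.insert a (PySem.Set.ofList p.1)),
             (PySem.Set.ofList p.1).foldl (fun d f => d.modify (a, f) 0 (· + 1)) st.2.2)) st) st).1
          (fl.foldl (fun st p => (PySem.Set.ofList p.2).foldl (fun st a =>
            (st.1.modify a 0 (· + 1),
             (if st.2.1.contains a then st.2.1 else st.2.1.insert a (PySem.Set.ofList p.1)),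
             (PySem.Set.ofList p.1).foldl (fun d f => d.modify (a, f) 0 (· + 1)) st.2.2)) st) st).2.1
          (fl.foldl (fun st p => (PySem.Set.ofList p.2).foldl (fun st a =>
            (st.1.modify a 0 (· + 1),
             (if st.2.1.contains a then st.2.1 else st.2.1.insert a (PySem.Set.ofList p.1)),
             (PySem.Set.ofList p.1).foldl (fun d f => d.modify (a, f) 0 (· + 1)) st.2.2)) st) st).2.2 := by
  induction fl generalizing ap st with
  | nil => exact h
  | cons p t ih =>
    simp only [List.foldl_cons]
    exact ih _ _ (pv_inner p.1 (PySem.Set.ofList p.2) ap st h)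

-- the appearance counter is the counter of the flattened (deduplicated per entry) food lists
theorem pv_na_flatten (fl : List (List String × List String)) (d : PySem.Dict String Int) :
    fl.foldl (fun d p => (PySem.Set.ofList p.1).foldl (fun d food => d.modify food 0 (· + 1)) d) d
      = (fl.flatMap (fun p => PySem.Set.ofList p.1)).foldl (fun d food => d.modify food 0 (· + 1)) d := by
  induction fl generalizing d with
  | nil => rfl
  | cons p fl ih => simp [List.foldl_cons, List.flatMap_cons, List.foldl_append, ih]

-- membership in a left fold of unions
theorem pv_mem_foldl_union {α : Type} (l : List α) (h : α → List String)
    (acc : PySem.Set String) (x : String) :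
    x ∈ l.foldl (fun acc s => PySem.Set.union acc (h s)) acc ↔ x ∈ acc ∨ ∃ s ∈ l, x ∈ h s := by
  induction l generalizing acc with
  | nil => simp
  | cons a l ih =>
    rw [List.foldl_cons, ih]
    simp only [PySem.Set.union, PySem.Set.mem_update, List.mem_cons]
    constructor
    · rintro ((h1 | h1) | ⟨s, hs, hx⟩)
      · exact Or.inl h1
      · exact Or.inr ⟨a, Or.inl rfl, h1⟩
      · exact Or.inr ⟨s, Or.inr hs, hx⟩
    · rintro (h1 | ⟨s, (rfl | hs), hx⟩)
      · exact Or.inl (Or.inl h1)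
      · exact Or.inl (Or.inr hx)
      · exact Or.inr ⟨s, hs, hx⟩

-- the two membership tests agree
theorem pv_fwa_contains (vals : List (List String)) (x : String) :
    PySem.Set.contains (vals.foldl (fun acc s => PySem.Set.union acc (PySem.Set.ofList s)) PySem.Set.empty) x
      = PySem.Set.contains (vals.foldl (fun acc s => PySem.Set.union acc s) PySem.Set.empty) x := by
  rw [PySem.Set.contains_eq_listContains, PySem.Set.contains_eq_listContains,
      Bool.eq_iff_iff, List.contains_iff_mem, List.contains_iff_mem,
      pv_mem_foldl_union, pv_mem_foldl_union]
  simp [PySem.Set.mem_ofList]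

theorem pv_sum_indicator (S : List String) (x : String) (hnd : S.Nodup) (hx : x ∈ S) :
    (S.map (fun k => if x = k then (1 : Int) else 0)).sum = 1 := by
  induction S with
  | nil => simp at hx
  | cons a S ih =>
    rw [List.map_cons, List.sum_cons]
    by_cases h : x = a
    · subst h
      have hnot : x ∉ S := (List.nodup_cons.1 hnd).1
      have hz : (S.map (fun k => if x = k then (1 : Int) else 0)).sum = 0 := by
        apply List.sum_eq_zero
        intro y hy
        obtain ⟨k, hk, rfl⟩ := List.mem_map.1 hy
        have hne : x ≠ k := fun he => hnot (he ▸ hk)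
        simp [hne]
      simp [hz]
    · have hx' : x ∈ S := by
        rcases List.mem_cons.1 hx with h' | h'
        · exact absurd h' h
        · exact h'
      rw [if_neg h, ih (List.nodup_cons.1 hnd).2 hx']
      simp


theorem pv_sum_counts (S G : List String) (hnd : S.Nodup) (hG : ∀ x ∈ G, x ∈ S) :
    (S.map (fun k => (G.count k : Int))).sum = G.length := by
  induction G with
  | nil => simp
  | cons x G ih =>
    have h1 : ∀ k, ((x :: G).count k : Int) = (G.count k : Int) + (if x = k then 1 else 0) := by
      intro k
      rw [List.count_cons]
      push_cast
      by_cases h : x = k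
      · simp [h]
      · simp [h]
    calc (S.map (fun k => ((x :: G).count k : Int))).sum
        = (S.map (fun k => (G.count k : Int) + (if x = k then 1 else 0))).sum := by
          congr 1; exact List.map_congr_left (fun k _ => h1 k)
      _ = (S.map (fun k => (G.count k : Int))).sum + (S.map (fun k => if x = k then (1 : Int) else 0)).sum := PySem.List.sum_map_add_int _ _ _
      _ = (G.length : Int) + 1 := by
          rw [ih (fun y hy => hG y (List.mem_cons_of_mem _ hy))]
          rw [pv_sum_indicator S x hnd (hG x List.mem_cons_self)]
      _ = ((x :: G).length : Int) := by push_cast [List.length_cons]; ring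

theorem pv_count_b (fl : List (List String × List String)) (pr : String → Bool) (c : Int) :
    fl.foldl (fun c p => c + (((PySem.Set.ofList p.1).filter pr).length : Int)) c
      = c + (((fl.flatMap (fun p => PySem.Set.ofList p.1)).filter pr).length : Int) := by
  induction fl generalizing c with
  | nil => simp
  | cons p fl ih =>
    simp only [List.foldl_cons, ih, List.flatMap_cons, List.filter_append, List.length_append]
    push_cast
    ring

theorem pv_count_a_eq (F : List String) (pr : String → Bool) :
    ((PySem.Set.ofList F).map (fun k => if pr k then (0 : Int) else (F.count k : Int))).sum
      = ((F.filter (fun f => !pr f)).length : Int) := by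
  have h1 : ∀ k ∈ PySem.Set.ofList F,
      (if pr k then (0 : Int) else (F.count k : Int)) = ((F.filter (fun f => !pr f)).count k : Int) := by
    intro k _
    by_cases h : pr k = true
    · have : k ∉ F.filter (fun f => !pr f) := by simp [List.mem_filter, h]
      rw [List.count_eq_zero.2 this]
      simp [h]
    · have hk : (!pr k) = true := by simp [Bool.not_eq_true] at h ⊢; exact h
      rw [List.count_filter (p := fun f => !pr f) (a := k) (l := F) hk]
      simp [h]
  rw [List.map_congr_left h1]
  exact pv_sum_counts (PySem.Set.ofList F) (F.filter (fun f => !pr f))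
    (PySem.Set.nodup_ofList F)
    (fun x hx => (PySem.Set.mem_ofList F x).2 (List.mem_of_mem_filter hx))

-- assembling the final results from the invariant
theorem pv_assemble (fl : List (List String × List String))
    (apD : PySem.Dict String (List String)) (nB : PySem.Dict String Int)
    (fB : PySem.Dict String (List String)) (pB : PySem.Dict (String × String) Int)
    (h : pvInv apD nB fB pB) :
    ((PySem.Dict.counter (fl.flatMap (fun p => PySem.Set.ofList p.1))).items.foldl
        (fun c q => c + (if PySem.Set.contains
            (apD.values.foldl (fun acc x => PySem.Set.union acc (PySem.Set.ofList x)) PySem.Set.empty) q.1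
          then 0 else q.2)) 0,
      apD.items)
    = (fl.foldl (fun c p => c + (((PySem.Set.ofList p.1).filter (fun f => !PySem.Set.contains
          ((((nB.items.map (fun q => (q.1, (fB.getD q.1 []).filter
                (fun f => pB.getD (q.1, f) 0 == nB.getD q.1 0)))).map
              (fun q => q.2)).foldl (fun acc s => PySem.Set.union acc s) PySem.Set.empty)) f)).length : Int)) 0,
       nB.items.map (fun q => (q.1, (fB.getD q.1 []).filter
         (fun f => pB.getD (q.1, f) 0 == nB.getD q.1 0)))) := by
  obtain ⟨hk, hnd, hf, hp, hle, hv⟩ := h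
  have hndn : nB.keys.Nodup := hk ▸ hnd
  have hitems : nB.items.map (fun q => (q.1, (fB.getD q.1 []).filter
      (fun f => pB.getD (q.1, f) 0 == nB.getD q.1 0))) = apD.items := by
    rw [PySem.Dict.items_eq_map_keys nB hndn 0, List.map_map,
        PySem.Dict.items_eq_map_keys apD hnd [], hk]
    apply List.map_congr_left
    intro a ha
    have hc : apD.contains a = true := by
      rw [PySem.Dict.contains_iff_mem_keys, hk]; exact ha
    have := hv a hc
    unfold pvVal at this
    simp only [Function.comp_def]
    exact Prod.ext rfl this.symm
  refine Prod.ext ?_ hitems.symm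
  have hvals : apD.values = (nB.items.map (fun q => (q.1, (fB.getD q.1 []).filter
      (fun f => pB.getD (q.1, f) 0 == nB.getD q.1 0)))).map (fun q => q.2) := by
    simp only [PySem.Dict.values, ← hitems]
  show (PySem.Dict.counter (fl.flatMap (fun p => PySem.Set.ofList p.1))).items.foldl
      (fun c q => c + (if PySem.Set.contains _ q.1 then 0 else q.2)) 0 = _
  rw [hvals]
  set F := fl.flatMap (fun p => PySem.Set.ofList p.1) with hF
  set vals := (nB.items.map (fun q => (q.1, (fB.getD q.1 []).filter
      (fun f => pB.getD (q.1, f) 0 == nB.getD q.1 0)))).map (fun q => q.2) with hvalsdef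
  set fwaA := vals.foldl (fun acc x => PySem.Set.union acc (PySem.Set.ofList x)) PySem.Set.empty with hfa
  set fwaB := vals.foldl (fun acc s => PySem.Set.union acc s) PySem.Set.empty with hfb
  have hcontains : ∀ x, PySem.Set.contains fwaA x = PySem.Set.contains fwaB x :=
    fun x => pv_fwa_contains vals x
  rw [PySem.List.foldl_add ((PySem.Dict.counter F).items)
      (fun q => if PySem.Set.contains fwaA q.1 then 0 else q.2) 0,
      PySem.Dict.items_counter, List.map_map, pv_count_b]
  simp only [zero_add, Function.comp_def]
  have hmapeq : (PySem.Set.ofList F).map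
      (fun k => if PySem.Set.contains fwaA k then (0 : Int) else ((F.count k : Nat) : Int))
    = (PySem.Set.ofList F).map
      (fun k => if PySem.Set.contains fwaB k then (0 : Int) else ((F.count k : Nat) : Int)) :=
    List.map_congr_left (fun k _ => by rw [hcontains k])
  rw [hmapeq, pv_count_a_eq F (fun k => PySem.Set.contains fwaB k)]

-- ===== VERDICT (by name: the statement is the Claim_ definition above) =====
theorem num_without_allergens_spec : Claim_equal_num_without_allergens := by
  intro food_list _ _
  unfold Spec_num_without_allergens
  simp only [num_without_allergens, num_without_allergens_alt]
  have hsplit := PySem.List.foldl_prod_mk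
      (fun (d : PySem.Dict String (List String)) (p : List String × List String) =>
        (PySem.Set.ofList p.2).foldl (fun d al =>
          if d.contains al = false then d.insert al (PySem.Set.ofList p.1)
          else d.modify al [] (fun s => PySem.Set.inter s (PySem.Set.ofList p.1))) d)
      (fun (d : PySem.Dict String Int) (p : List String × List String) =>
        (PySem.Set.ofList p.1).foldl (fun d food => d.modify food 0 (· + 1)) d)
      food_list PySem.Dict.empty PySem.Dict.empty
  rw [hsplit, pv_na_flatten, ← PySem.Dict.counter_eq_foldl]
  have h0 : pvInv PySem.Dict.empty PySem.Dict.empty PySem.Dict.empty PySem.Dict.empty := by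
    refine ⟨rfl, List.nodup_nil, fun a => rfl, ?_, ?_, ?_⟩
    · intro a f hc; simp [PySem.Dict.contains_empty] at hc
    · intro a f; simp [PySem.Dict.getD_empty]
    · intro a hc; simp [PySem.Dict.contains_empty] at hc
  exact pv_assemble food_list _ _ _ _
    (pv_outer food_list PySem.Dict.empty
      (PySem.Dict.empty, PySem.Dict.empty, PySem.Dict.empty) h0)
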